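-- pv_equiv track=rewrite | github.com/sakthianand7/CSV_to_HTML_table | python_csv_to_html_table.py | convert_csv_to_html
-- ===== SOURCE A (Python) =====
-- def convert_csv_to_html(data):
--   html_content = """
--   <html>
--   <head>
--   <style>
--   table {
--     width: 25%;
--     font-family: "Times New Roman", Times, serif;
--     border-collapse: collapse;
--   }
--
--   tr:nth-child(odd) {
--     background-color: #dddddd;
--   }
--
--   td, th {
--     border: 1px solid #dddddd;
--     text-align: left;
--     padding: 6px;
--   }
--   </style>
--   </head>
--   <body>
--   """
--   title="CSV TO HTML TABLE"
--   html_content += "<h2>{}</h2><table>".format(title)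
--   for i, row in enumerate(data):
--     html_content += "<tr>"
--     for column in row:
--         if i == 0:
--             html_content += "<th>{}</th>".format(column)
--         else:
--             html_content += "<td>{}</td>".format(column)
--     html_content += "</tr>"
--
--   html_content += """</tr></table></body></html>"""
--   return html_content
-- ===== SOURCE B (Python) =====
-- _PREFIX = """
--   <html>
--   <head>
--   <style>
--   table {
--     width: 25%;
--     font-family: "Times New Roman", Times, serif;
--     border-collapse: collapse;
--   }
--
--   tr:nth-child(odd) {
--     background-color: #dddddd;
--   }
--
--   td, th {
--     border: 1px solid #dddddd;
--     text-align: left;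
--     padding: 6px;
--   }
--   </style>
--   </head>
--   <body>
--   """
--
--
-- def _rows(rows, tag):
--     """Token stream for the table rows: recursion threads the cell tag
--     ('th' for the first call, 'td' afterwards) instead of testing an index."""
--     if not rows:
--         return []
--     return (["<tr>"]
--             + ["<{0}>{1}</{0}>".format(tag, c) for c in rows[0]]
--             + ["</tr>"]
--             + _rows(rows[1:], "td"))
--
--
-- def convert_csv_to_html(data):
--     return "".join([_PREFIX, "<h2>CSV TO HTML TABLE</h2><table>"]
--                    + _rows(data, "th")
--                    + ["</tr></table></body></html>"])
-- ===== Notes on version B (the rewrite author's own statement) =====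
-- stated objective: alternative
-- what changed: B replaces A's single enumerate loop with an i==0 branch and string += accumulation by a recursive token-stream builder that threads the cell tag ('th' then 'td') through the recursion and joins all fragments once at the end.
import Mathlib
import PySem

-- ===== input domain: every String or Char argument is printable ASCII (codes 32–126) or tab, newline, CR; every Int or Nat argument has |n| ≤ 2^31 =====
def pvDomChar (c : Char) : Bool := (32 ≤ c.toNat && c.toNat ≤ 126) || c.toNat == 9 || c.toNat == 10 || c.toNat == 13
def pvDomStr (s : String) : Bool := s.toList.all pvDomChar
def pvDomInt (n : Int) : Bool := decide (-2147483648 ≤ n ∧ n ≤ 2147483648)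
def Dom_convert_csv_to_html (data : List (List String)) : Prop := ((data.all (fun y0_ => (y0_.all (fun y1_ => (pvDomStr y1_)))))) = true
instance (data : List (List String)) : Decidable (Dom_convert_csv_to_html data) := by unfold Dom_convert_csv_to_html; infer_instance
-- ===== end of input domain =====

-- B: a recursive token-stream builder (tag threaded through the recursion, one final join)
-- instead of A's index-branching accumulating loop; same returned string.

-- shared static text (identical in both Python sources)
def pvHtmlPrefix : String := "\n  <html>\n  <head>\n  <style>\n  table {\n    width: 25%;\n    font-family: \"Times New Roman\", Times, serif;\n    border-collapse: collapse;\n  }\n\n  tr:nth-child(odd) {\n    background-color: #dddddd;\n  }\n\n  td, th {\n    border: 1px solid #dddddd;\n    text-align: left;\n    padding: 6px;\n  }\n  </style>\n  </head>\n  <body>\n  "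

-- ===== PORT A =====
def convert_csv_to_html (data : List (List String)) : String :=
  let html0 := pvHtmlPrefix ++ "<h2>" ++ "CSV TO HTML TABLE" ++ "</h2><table>"
  let html1 := (PySem.List.enumerate data).foldl
    (fun acc p =>
      let acc := acc ++ "<tr>"
      let acc := p.2.foldl
        (fun acc column =>
          if p.1 == 0 then acc ++ ("<th>" ++ column ++ "</th>")
          else acc ++ ("<td>" ++ column ++ "</td>")) acc
      acc ++ "</tr>") html0
  html1 ++ "</tr></table></body></html>"

-- ===== PORT B =====
def pvRowsTok : List (List String) → String → List String
  | [], _ => []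
  | r :: rest, tag =>
      ("<tr>" :: r.map (fun c => "<" ++ tag ++ ">" ++ c ++ "</" ++ tag ++ ">") ++ ["</tr>"])
        ++ pvRowsTok rest "td"

def convert_csv_to_html_alt (data : List (List String)) : String :=
  String.join ([pvHtmlPrefix, "<h2>CSV TO HTML TABLE</h2><table>"]
    ++ pvRowsTok data "th"
    ++ ["</tr></table></body></html>"])

-- ===== PRECONDITION & SPEC =====
def Spec_convert_csv_to_html (data : List (List String)) (out : String) : Prop := out = convert_csv_to_html_alt data
instance (data : List (List String)) (out : String) : Decidable (Spec_convert_csv_to_html data out) := by unfold Spec_convert_csv_to_html; infer_instance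

-- ===== CLAIM (what is proved, stated in full; the proofs are below) =====
def Claim_equal_convert_csv_to_html : Prop := ∀ (data : List (List String)), Dom_convert_csv_to_html data → Spec_convert_csv_to_html data (convert_csv_to_html data)

-- ===== LEMMAS AND PROOFS =====

lemma foldl_append_init (a : String) (l : List String) : ∀ b,
    l.foldl (· ++ ·) (a ++ b) = a ++ l.foldl (· ++ ·) b := by
  induction l with
  | nil => intro b; rfl
  | cons h t ih => intro b; simpa [List.foldl, String.append_assoc] using ih (b ++ h)

lemma join_cons (x : String) (l : List String) : String.join (x :: l) = x ++ String.join l := by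
  simpa [String.join, List.foldl] using foldl_append_init x l ""

lemma join_append (l1 l2 : List String) :
    String.join (l1 ++ l2) = String.join l1 ++ String.join l2 := by
  induction l1 with
  | nil => simp [String.join, List.foldl]
  | cons h t ih => simp [join_cons, ih, String.append_assoc]

-- A's inner loop appends one cell at a time; as a join
lemma cellsA_eq (row : List String) (o c : String) (acc : String) :
    row.foldl (fun acc column => acc ++ (o ++ column ++ c)) acc
      = acc ++ String.join (row.map (fun x => o ++ x ++ c)) := by
  induction row generalizing acc with
  | nil => simp [String.join]
  | cons h t ih =>
    simp only [List.foldl, List.map, ih, join_cons]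
    simp [String.append_assoc]

-- A's outer loop over the tail (indices ≥ 1) builds exactly the join of B's "td" token stream
lemma bodyA_eq (t : List (List String)) (n : Int) (hn : 1 ≤ n) (acc : String) :
    (PySem.List.enumerate t n).foldl
      (fun acc p =>
        let acc := acc ++ "<tr>"
        let acc := p.2.foldl
          (fun acc column =>
            if p.1 == 0 then acc ++ ("<th>" ++ column ++ "</th>")
            else acc ++ ("<td>" ++ column ++ "</td>")) acc
        acc ++ "</tr>") acc
      = acc ++ String.join (pvRowsTok t "td") := by
  induction t generalizing n acc with
  | nil => simp [PySem.List.enumerate, pvRowsTok, String.join]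
  | cons h tl ih =>
    have hb : (n == 0) = false := by simpa using (by omega : n ≠ 0)
    simp only [PySem.List.enumerate_cons, List.foldl, hb, Bool.false_eq_true, if_false]
    rw [ih (n + 1) (by omega), cellsA_eq]
    simp only [pvRowsTok, join_append, join_cons]
    simp [String.join, String.append_assoc]

-- ===== VERDICT (by name: the statement is the Claim_ definition above) =====
set_option maxRecDepth 100000 in
theorem convert_csv_to_html_spec : Claim_equal_convert_csv_to_html := by
  intro data _
  show _ = _
  cases data with
  | nil =>
    simp only [convert_csv_to_html, convert_csv_to_html_alt, pvRowsTok]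
    rfl
  | cons h t =>
    simp only [convert_csv_to_html, convert_csv_to_html_alt, PySem.List.enumerate_cons,
      List.foldl]
    rw [bodyA_eq t (0+1) (by omega)]
    simp only [beq_self_eq_true, if_true]
    rw [cellsA_eq]
    simp only [pvRowsTok, List.cons_append, join_cons, join_append]
    simp only [String.join, String.append_assoc]
    rfl
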